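-- pv_equiv track=rewrite | github.com/mozilla-platform-ops/fleetroll_mvp | tests/test_monitor_render.py | _sep_positions
-- ===== SOURCE A (Python) =====
-- def _sep_positions(line: str) -> list[int]:
--     positions = []
--     idx = 0
--     while True:
--         idx = line.find(" | ", idx)
--         if idx == -1:
--             return positions
--         positions.append(idx)
--         idx += 3
-- ===== SOURCE B (Python) =====
-- def _sep_positions(line: str) -> list[int]:
--     # stage 1: sliding window (zip of three shifted views) lists every
--     # (possibly overlapping) occurrence of " | ";
--     # stage 2: greedy thinning keeps each occurrence only if it starts at
--     # least 3 past the last kept one (non-overlapping, left-greedy).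
--     triples = zip(line, line[1:], line[2:])
--     cands = [i for i, t in enumerate(triples) if t == (' ', '|', ' ')]
--     positions = []
--     last = -3
--     for i in cands:
--         if i - last >= 3:
--             positions.append(i)
--             last = i
--     return positions
-- ===== Notes on version B (the rewrite author's own statement) =====
-- stated objective: alternative
-- what changed: Replaces A's single str.find re-scan loop by two staged passes: a sliding-window zip/enumerate pass that lists every (possibly overlapping) occurrence of ' | ', then a greedy thinning pass that keeps an occurrence only if it starts at least 3 past the last kept one.
import Mathlib
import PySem

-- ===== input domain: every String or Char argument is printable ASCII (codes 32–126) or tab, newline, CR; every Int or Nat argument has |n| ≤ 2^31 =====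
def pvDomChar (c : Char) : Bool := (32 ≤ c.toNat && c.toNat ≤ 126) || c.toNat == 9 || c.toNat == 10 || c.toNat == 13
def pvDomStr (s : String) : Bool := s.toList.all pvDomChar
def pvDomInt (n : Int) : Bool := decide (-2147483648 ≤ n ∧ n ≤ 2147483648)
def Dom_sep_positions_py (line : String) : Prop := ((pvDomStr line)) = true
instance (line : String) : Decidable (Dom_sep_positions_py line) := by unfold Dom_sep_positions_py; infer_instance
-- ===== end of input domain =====

-- B replaces A's repeated str.find loop by two staged passes: a sliding-window zip/enumerate
-- pass listing every (possibly overlapping) occurrence of " | ", then a greedy thinning pass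
-- keeping occurrences at least 3 apart; alternative decomposition, same cost.


-- ===== PORT A =====
-- the 3-character separator " | " as a char list
def sepPat : List Char := [' ', '|', ' ']

-- A's while-loop: idx = line.find(" | ", idx); stop on -1, else record it and idx += 3.
-- The `idx ≤ length` guard only makes the recursion total: when idx > length,
-- Python's find(..., idx) returns -1 and A returns, so both arms give [].
def sepAgo (l : List Char) (idx : Nat) : List Int :=
  if h : idx ≤ l.length then
    let r := PySem.Chars.findFrom l sepPat (idx : Int) none
    if hr : r = -1 then []
    else r :: sepAgo l (r.toNat + 3)
  else []
termination_by l.length + 1 - idx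
decreasing_by
  have := (PySem.Chars.findFrom_natCast_spec l sepPat idx h hr).1
  omega

def sep_positions_py (line : String) : List Int := sepAgo line.toList 0

-- ===== PORT B =====
-- Source B stage 1: triples = zip(line, line[1:], line[2:]);
--   cands = [i for i, t in enumerate(triples) if t == (' ', '|', ' ')]
-- Source B stage 2: fold over cands with (last, positions), keeping i when i - last >= 3.
def sep_positions_py_alt (line : String) : List Int :=
  let l := line.toList
  let trips := l.zip ((l.drop 1).zip (l.drop 2))
  let cands := (PySem.List.enumerate trips 0).filterMap
    (fun p => if p.2 = (' ', ('|', ' ')) then some p.1 else none)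
  (cands.foldl (fun st i => if 3 ≤ i - st.1 then (i, st.2 ++ [i]) else st) (-3, [])).2

-- ===== PRECONDITION & SPEC =====
def Spec_sep_positions_py (line : String) (out : List Int) : Prop := out = sep_positions_py_alt line
instance (line : String) (out : List Int) : Decidable (Spec_sep_positions_py line out) := by unfold Spec_sep_positions_py; infer_instance

-- ===== CLAIM (what is proved, stated in full; the proofs are below) =====
def Claim_equal_sep_positions_py : Prop := ∀ (line : String), Dom_sep_positions_py line → Spec_sep_positions_py line (sep_positions_py line)

-- ===== LEMMAS AND PROOFS =====

-- reference scan: emit the first occurrence, restart 3 chars after it (proof helper)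
def sepBgo (l : List Char) (i : Nat) : List Int :=
  match l with
  | c1 :: c2 :: c3 :: rest =>
    if c1 = ' ' ∧ c2 = '|' ∧ c3 = ' ' then (i : Int) :: sepBgo rest (i + 3)
    else sepBgo (c2 :: c3 :: rest) (i + 1)
  | _ => []

-- all (overlapping) occurrence positions, one char at a time (proof helper)
def occs (l : List Char) (i : Nat) : List Int :=
  match l with
  | c1 :: c2 :: c3 :: rest =>
    if c1 = ' ' ∧ c2 = '|' ∧ c3 = ' ' then (i : Int) :: occs (c2 :: c3 :: rest) (i + 1)
    else occs (c2 :: c3 :: rest) (i + 1)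
  | _ => []

-- greedy thinning as a recursion (proof helper)
def greedyGo : List Int → Int → List Int
  | [], _ => []
  | i :: rest, last => if 3 ≤ i - last then i :: greedyGo rest i else greedyGo rest last

-- when the pattern starts the string, find returns 0
theorem find_of_prefix (l : List Char) (hp : sepPat <+: l) :
    PySem.Chars.find l sepPat = 0 := by
  have hinf : sepPat <:+: l := hp.isInfix
  have h0 : 0 ≤ PySem.Chars.find l sepPat := (PySem.Chars.find_nonneg_iff l sepPat).2 hinf
  obtain ⟨h1, h2⟩ := PySem.Chars.find_spec h0
  by_contra hne
  have hpos : 0 < (PySem.Chars.find l sepPat).toNat := by omega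
  exact h2 0 hpos (by simpa using hp)

-- find on a cons, when the pattern is not a prefix: shift by one
theorem find_cons_shift (c : Char) (t : List Char)
    (hnp : ¬ sepPat <+: (c :: t)) :
    PySem.Chars.find (c :: t) sepPat =
      if PySem.Chars.find t sepPat = -1 then -1 else 1 + PySem.Chars.find t sepPat := by
  by_cases ht : PySem.Chars.find t sepPat = -1
  · simp only [ht, if_pos]
    rw [PySem.Chars.find_eq_neg_one_iff]
    rw [PySem.Chars.find_eq_neg_one_iff] at ht
    rw [List.infix_cons_iff]
    rintro (h | h)
    · exact hnp h
    · exact ht h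
  · rw [if_neg ht]
    have h0t : 0 ≤ PySem.Chars.find t sepPat := by
      have := PySem.Chars.neg_one_le_find t sepPat; omega
    obtain ⟨ht1, ht2⟩ := PySem.Chars.find_spec h0t
    have hinf : sepPat <:+: (c :: t) := by
      rw [List.infix_cons_iff]
      exact Or.inr ((PySem.Chars.find_nonneg_iff t sepPat).1 h0t)
    have h0 : 0 ≤ PySem.Chars.find (c :: t) sepPat :=
      (PySem.Chars.find_nonneg_iff _ sepPat).2 hinf
    obtain ⟨h1, h2⟩ := PySem.Chars.find_spec h0
    set m := (PySem.Chars.find (c :: t) sepPat).toNat with hm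
    have hm0 : m ≠ 0 := by
      intro h
      rw [h] at h1; exact hnp (by simpa using h1)
    have hdrop : (c :: t).drop m = t.drop (m - 1) := by
      obtain ⟨k, hk⟩ : ∃ k, m = k + 1 := ⟨m - 1, by omega⟩
      simp [hk]
    rw [hdrop] at h1
    have hle : (PySem.Chars.find t sepPat).toNat ≤ m - 1 := by
      by_contra hlt
      exact ht2 (m - 1) (by omega) h1
    have hge : m ≤ (PySem.Chars.find t sepPat).toNat + 1 := by
      by_contra hlt
      exact h2 ((PySem.Chars.find t sepPat).toNat + 1) (by omega) (by simpa using ht1)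
    have e1 := Int.toNat_of_nonneg h0
    have e2 := Int.toNat_of_nonneg h0t
    omega

-- a string shorter than the pattern has no occurrence
theorem find_short (l : List Char) (hl : l.length < 3) :
    PySem.Chars.find l sepPat = -1 := by
  rw [PySem.Chars.find_eq_neg_one_iff]
  intro h
  have := h.length_le
  simp [sepPat] at this
  omega

-- the reference scan, characterized through find
theorem sepBgo_eq_find (l : List Char) (i : Nat) :
    sepBgo l i =
      if PySem.Chars.find l sepPat = -1 then []
      else ((i : Int) + PySem.Chars.find l sepPat) ::
        sepBgo (l.drop ((PySem.Chars.find l sepPat).toNat + 3))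
          (i + (PySem.Chars.find l sepPat).toNat + 3) := by
  fun_induction sepBgo l i with
  | case1 i c1 c2 c3 rest hmatch ih =>
    obtain ⟨h1, h2, h3⟩ := hmatch
    have hp : sepPat <+: (c1 :: c2 :: c3 :: rest) := by
      subst h1 h2 h3; exact ⟨rest, rfl⟩
    rw [find_of_prefix _ hp]
    simp
  | case2 i c1 c2 c3 rest hmatch ih =>
    have hnp : ¬ sepPat <+: (c1 :: c2 :: c3 :: rest) := by
      intro h
      obtain ⟨s, hs⟩ := h
      simp only [sepPat, List.cons_append, List.nil_append, List.cons.injEq] at hs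
      exact hmatch ⟨hs.1.symm, hs.2.1.symm, hs.2.2.1.symm⟩
    rw [find_cons_shift _ _ hnp]
    by_cases hf : PySem.Chars.find (c2 :: c3 :: rest) sepPat = -1
    · simp [ih, hf]
    · have h0 : 0 ≤ PySem.Chars.find (c2 :: c3 :: rest) sepPat := by
        have := PySem.Chars.neg_one_le_find (c2 :: c3 :: rest) sepPat; omega
      have hne : ¬ (1 + PySem.Chars.find (c2 :: c3 :: rest) sepPat = -1) := by omega
      rw [if_neg hf, if_neg hne, ih, if_neg hf]
      have htn : (1 + PySem.Chars.find (c2 :: c3 :: rest) sepPat).toNat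
          = (PySem.Chars.find (c2 :: c3 :: rest) sepPat).toNat + 1 := by omega
      rw [htn]
      congr 1
      · push_cast; ring
      · have e : (PySem.Chars.find (c2 :: c3 :: rest) sepPat).toNat + 1 + 3
            = ((PySem.Chars.find (c2 :: c3 :: rest) sepPat).toNat + 3) + 1 := by omega
        rw [e, List.drop_succ_cons]
        congr 1
        omega
  | case3 l i h =>
    have hl : l.length < 3 := by
      match l, h with
      | [], _ => simp
      | [a], _ => simp
      | [a, b], _ => simp
      | a :: b :: c :: r, h => exact absurd rfl (h a b c r)
    rw [find_short l hl, if_pos rfl]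

-- A's find-loop equals the reference scan started at the same offset
theorem sepAgo_eq_sepBgo (l : List Char) (idx : Nat) :
    idx ≤ l.length → sepAgo l idx = sepBgo (l.drop idx) idx := by
  fun_induction sepAgo l idx with
  | case1 idx h r hr =>
    intro _
    rw [sepBgo_eq_find]
    have hfr := PySem.Chars.findFrom_natCast l sepPat idx h
    rw [show r = PySem.Chars.findFrom l sepPat (idx : Int) none from rfl] at hr
    rw [hfr] at hr
    by_cases hf : PySem.Chars.find (l.drop idx) sepPat = -1
    · rw [if_pos hf]
    · exfalso
      rw [if_neg hf] at hr
      have h0 : 0 ≤ PySem.Chars.find (l.drop idx) sepPat := by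
        have := PySem.Chars.neg_one_le_find (l.drop idx) sepPat; omega
      omega
  | case2 idx h r hr ih =>
    intro _
    have hfr := PySem.Chars.findFrom_natCast l sepPat idx h
    have hrdef : r = PySem.Chars.findFrom l sepPat (idx : Int) none := rfl
    rw [hrdef, hfr] at hr
    by_cases hf : PySem.Chars.find (l.drop idx) sepPat = -1
    · exact absurd (by rw [if_pos hf]) hr
    have h0 : 0 ≤ PySem.Chars.find (l.drop idx) sepPat := by
      have := PySem.Chars.neg_one_le_find (l.drop idx) sepPat; omega
    have hrval : r = (idx : Int) + PySem.Chars.find (l.drop idx) sepPat := by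
      rw [hrdef, hfr, if_neg hf]
    have hpre := (PySem.Chars.find_spec h0).1
    have hlen := hpre.length_le
    simp only [List.length_drop] at hlen
    have hsp : sepPat.length = 3 := rfl
    rw [hsp] at hlen
    have ht : ((idx : Int) + PySem.Chars.find (l.drop idx) sepPat).toNat
        = idx + (PySem.Chars.find (l.drop idx) sepPat).toNat := by omega
    have hrtoNat : r.toNat = idx + (PySem.Chars.find (l.drop idx) sepPat).toNat := by
      rw [hrval, ht]
    rw [sepBgo_eq_find, if_neg hf]
    rw [ih (by omega), hrtoNat, List.drop_drop, hrval, Nat.add_assoc]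
  | case3 idx h =>
    intro h'
    exact absurd h' h

-- B's candidate comprehension (enumerate over the zip of the three shifted views)
-- equals the char-at-a-time occurrence scan
theorem filterMap_enumerate_zip_eq_occs (l : List Char) (i : Nat) :
    ((PySem.List.enumerate (l.zip ((l.drop 1).zip (l.drop 2))) (i : Int)).filterMap
      (fun p => if p.2 = (' ', ('|', ' ')) then some p.1 else none)) = occs l i := by
  fun_induction occs l i with
  | case1 i c1 c2 c3 rest hmatch ih =>
    obtain ⟨h1, h2, h3⟩ := hmatch
    subst h1 h2 h3
    simp only [List.drop, List.zip_cons_cons, PySem.List.enumerate_cons, List.filterMap_cons,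
      if_true, List.cons.injEq, true_and]
    have := ih
    push_cast at this ⊢
    simpa using this
  | case2 i c1 c2 c3 rest hmatch ih =>
    simp only [List.drop, List.zip_cons_cons, PySem.List.enumerate_cons, List.filterMap_cons]
    rw [if_neg (by simpa [Prod.ext_iff] using hmatch)]
    have := ih
    push_cast at this ⊢
    simpa using this
  | case3 l i h =>
    match l, h with
    | [], _ => simp
    | [a], _ => simp
    | [a, b], _ => simp
    | a :: b :: c :: r, h => exact absurd rfl (h a b c r)

-- B's fold accumulates exactly the greedy recursion
theorem foldl_greedy (cs : List Int) (last : Int) (acc : List Int) :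
    (cs.foldl (fun st i => if 3 ≤ i - st.1 then (i, st.2 ++ [i]) else st) (last, acc)).2
      = acc ++ greedyGo cs last := by
  induction cs generalizing last acc with
  | nil => simp [greedyGo]
  | cons i rest ih =>
    simp only [List.foldl_cons, greedyGo]
    by_cases h : 3 ≤ i - last
    · rw [if_pos h, if_pos h, ih]
      simp
    · rw [if_neg h, if_neg h, ih]

-- greedy thinning of all occurrences equals the skip-3 reference scan
theorem greedy_occs_eq_sepBgo (l : List Char) (i : Nat) (last : Int) :
    greedyGo (occs l i) last
      = sepBgo (l.drop ((last + 3 - (i : Int)).toNat)) (i + (last + 3 - (i : Int)).toNat) := by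
  fun_induction occs l i generalizing last with
  | case1 i c1 c2 c3 rest hmatch ih =>
    obtain ⟨h1, h2, h3⟩ := hmatch
    subst h1 h2 h3
    by_cases hd : last + 3 ≤ (i : Int)
    · have hd0 : (last + 3 - (i : Int)).toNat = 0 := by omega
      have hsB : sepBgo (' ' :: '|' :: ' ' :: rest) (i + 0) = (i : Int) :: sepBgo rest (i + 3) := by
        simp [sepBgo]
      rw [greedyGo, if_pos (by omega), hd0, List.drop_zero, hsB]
      refine congrArg _ ?_
      rw [ih i]
      have h2' : ((i : Int) + 3 - ((i : Nat) + 1 : Nat)).toNat = 2 := by push_cast; omega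
      rw [h2']
      simp
    · have hd1 : (last + 3 - ((i : Nat) + 1 : Nat)).toNat + 1 = (last + 3 - (i : Int)).toNat := by
        push_cast; omega
      rw [greedyGo, if_neg (by omega), ih last]
      have : (' ' :: '|' :: ' ' :: rest).drop ((last + 3 - (i : Int)).toNat)
          = ('|' :: ' ' :: rest).drop ((last + 3 - ((i : Nat) + 1 : Nat)).toNat) := by
        rw [← hd1]; simp
      rw [this]
      congr 1
      omega
  | case2 i c1 c2 c3 rest hmatch ih =>
    rw [ih last]
    by_cases hd : last + 3 ≤ (i : Int)
    · have hd0 : (last + 3 - (i : Int)).toNat = 0 := by omega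
      have hd0' : (last + 3 - ((i : Nat) + 1 : Nat)).toNat = 0 := by push_cast; omega
      rw [hd0, hd0']
      simp only [List.drop_zero, Nat.add_zero]
      conv_rhs => rw [sepBgo, if_neg hmatch]
    · have hd1 : (last + 3 - ((i : Nat) + 1 : Nat)).toNat + 1 = (last + 3 - (i : Int)).toNat := by
        push_cast; omega
      have : (c1 :: c2 :: c3 :: rest).drop ((last + 3 - (i : Int)).toNat)
          = (c2 :: c3 :: rest).drop ((last + 3 - ((i : Nat) + 1 : Nat)).toNat) := by
        rw [← hd1]; simp
      rw [this]
      congr 1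
      omega
  | case3 l i h =>
    have hl : l.length < 3 := by
      match l, h with
      | [], _ => simp
      | [a], _ => simp
      | [a, b], _ => simp
      | a :: b :: c :: r, h => exact absurd rfl (h a b c r)
    rw [greedyGo]
    match hdl : l.drop ((last + 3 - (i : Int)).toNat) with
    | [] => rfl
    | [a] => rfl
    | [a, b] => rfl
    | a :: b :: c :: r =>
      exfalso
      have := congrArg List.length hdl
      simp at this
      omega

-- ===== VERDICT (by name: the statement is the Claim_ definition above) =====
theorem sep_positions_py_spec : Claim_equal_sep_positions_py := by
  intro line _
  unfold Spec_sep_positions_py sep_positions_py sep_positions_py_alt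
  show sepAgo line.toList 0 =
    (((PySem.List.enumerate (line.toList.zip ((line.toList.drop 1).zip (line.toList.drop 2))) 0).filterMap
        (fun p => if p.2 = (' ', ('|', ' ')) then some p.1 else none)).foldl
      (fun st i => if 3 ≤ i - st.1 then (i, st.2 ++ [i]) else st) (-3, ([] : List Int))).2
  have h1 := filterMap_enumerate_zip_eq_occs line.toList 0
  push_cast at h1
  rw [h1, foldl_greedy]
  have h2 := greedy_occs_eq_sepBgo line.toList 0 (-3)
  norm_num at h2
  rw [h2]
  simpa using sepAgo_eq_sepBgo line.toList 0 (Nat.zero_le _)
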